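-- pv_equiv track=rewrite | github.com/connorferster/handcalcs | handcalcs/__init__.py | format_calc_lines
-- ===== SOURCE A (Python) =====
-- def format_calc_lines(latex_code: str) -> str:
--     """
--     Returns a line of 'latex_code' that has been formatted for the 'aligned' environment
--     """
--     equals_signs = [idx for idx, char in enumerate(latex_code) if char == "="]
--     second_equals = equals_signs[1]  # Change to 1 for second equals
--
--     latex_code = latex_code.replace("=", "&=")  # Align with ampersands for '\align'
--     remove_amp_from_second = (
--         f"{latex_code[0:second_equals + 1]}{latex_code[second_equals + 2:]}"
--     )
--     normal_line = f"{remove_amp_from_second}\n"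
--     return normal_line
-- ===== SOURCE B (Python) =====
-- def format_calc_lines(latex_code: str) -> str:
--     """
--     Returns a line of 'latex_code' that has been formatted for the 'aligned' environment
--     """
--     out = []
--     seen = 0
--     for ch in latex_code:
--         if ch == "=":
--             seen += 1
--             out.append("=" if seen == 2 else "&=")
--         else:
--             out.append(ch)
--     if seen < 2:
--         raise ValueError("line must contain at least two '=' signs")
--     return "".join(out) + "\n"
-- ===== Notes on version B (the rewrite author's own statement) =====
-- stated objective: simpler
-- what changed: Replaces A's pipeline (collect all '=' indices, global replace of '=' by '&=', then slice-splice out the '&' before the second '=') with a single character scan keeping a count of '=' seen, emitting '=' for the second occurrence and '&=' for every other one.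
-- outside the precondition, e.g. on format_calc_lines('='): A raises IndexError, B raises ValueError; on format_calc_lines('&='): A raises IndexError, B raises ValueError
import Mathlib
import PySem

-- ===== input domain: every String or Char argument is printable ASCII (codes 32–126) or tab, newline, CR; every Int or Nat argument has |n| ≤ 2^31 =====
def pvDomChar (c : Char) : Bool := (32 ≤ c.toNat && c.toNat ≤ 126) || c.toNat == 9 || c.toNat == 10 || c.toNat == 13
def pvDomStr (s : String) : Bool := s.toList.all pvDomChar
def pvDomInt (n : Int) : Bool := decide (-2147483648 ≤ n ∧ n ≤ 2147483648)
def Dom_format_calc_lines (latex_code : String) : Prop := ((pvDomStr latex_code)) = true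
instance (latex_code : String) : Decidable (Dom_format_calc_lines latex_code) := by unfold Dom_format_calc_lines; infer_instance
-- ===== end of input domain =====

-- B replaces A's index-list + global replace + slice-splice pipeline by one linear scan with a
-- counter of '=' seen so far (objective: simpler).

-- ===== PORT A =====
def format_calc_lines (latex_code : String) : String :=
  -- equals_signs = [idx for idx, char in enumerate(latex_code) if char == "="]
  let equals_signs : List Int :=
    (PySem.List.enumerate latex_code.toList 0).foldl
      (fun acc p => if p.2 == '=' then acc ++ [p.1] else acc) []
  -- second_equals = equals_signs[1]  (IndexError when there is no second '=': excluded by Pre_)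
  (PySem.List.pyGet? equals_signs 1).elim ""
    (fun second_equals =>
      let latex_code2 := PySem.Str.replace latex_code "=" "&="
      -- f-string concatenation of the two slices and "\n" (exact: concatenation of code points)
      String.ofList ((PySem.Str.slice latex_code2 (some 0) (some (second_equals + 1))).toList
        ++ (PySem.Str.slice latex_code2 (some (second_equals + 2)) none).toList
        ++ ['\n']))

-- ===== PORT B =====
def format_calc_lines_alt (latex_code : String) : String :=
  let r := latex_code.toList.foldl
    (fun (st : Int × List Char) ch =>
      if ch == '=' then
        (st.1 + 1, st.2 ++ (if st.1 + 1 == 2 then ['='] else ['&', '=']))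
      else (st.1, st.2 ++ [ch]))
    (0, [])
  -- raise ValueError when there is no second '=' (excluded by Pre_): no value, port returns ""
  if r.1 < 2 then "" else String.ofList (r.2 ++ ['\n'])

-- ===== PRECONDITION & SPEC =====
-- Pre_ excludes exactly the inputs with fewer than two '=' signs, on which A raises IndexError
-- (equals_signs[1]) and B raises ValueError.
def Pre_format_calc_lines (latex_code : String) : Prop :=
  2 ≤ latex_code.toList.count '='
instance (latex_code : String) : Decidable (Pre_format_calc_lines latex_code) := by
  unfold Pre_format_calc_lines; infer_instance
def pvWitness_format_calc_lines : String := "a=b=c"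

def Spec_format_calc_lines (latex_code : String) (out : String) : Prop :=
  out = format_calc_lines_alt latex_code
instance (latex_code : String) (out : String) : Decidable (Spec_format_calc_lines latex_code out) := by
  unfold Spec_format_calc_lines; infer_instance

-- ===== CLAIM (what is proved, stated in full; the proofs are below) =====
def Claim_equal_format_calc_lines : Prop := ∀ (latex_code : String), Dom_format_calc_lines latex_code → Pre_format_calc_lines latex_code → Spec_format_calc_lines latex_code (format_calc_lines latex_code)

-- ===== LEMMAS AND PROOFS =====

-- what latex_code.replace("=", "&=") does, one character at a time
def pvRepl (l : List Char) : List Char := l.flatMap (fun c => if c == '=' then ['&', '='] else [c])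

-- what B's loop emits, starting from n signs already seen
def pvEmit : Int → List Char → List Char
  | _, [] => []
  | n, c :: t =>
      if c == '=' then (if n + 1 == 2 then ['='] else ['&', '=']) ++ pvEmit (n + 1) t
      else c :: pvEmit n t

theorem pvRepl_cons (c : Char) (t : List Char) :
    pvRepl (c :: t) = (if c == '=' then ['&', '='] else [c]) ++ pvRepl t := by
  simp [pvRepl]

theorem pvRepl_append (a b : List Char) : pvRepl (a ++ b) = pvRepl a ++ pvRepl b := by
  simp [pvRepl]

theorem replace_go_spec : ∀ (l : List Char) (fuel : Nat) (acc : List Char), l.length ≤ fuel →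
    PySem.Chars.replace.go ['='] ['&', '='] fuel l acc = acc.reverse ++ pvRepl l := by
  intro l
  induction l with
  | nil =>
    intro fuel acc _
    cases fuel <;> simp [PySem.Chars.replace.go, pvRepl]
  | cons c t ih =>
    intro fuel acc hle
    cases fuel with
    | zero => simp at hle
    | succ f =>
      rw [PySem.Chars.replace.go]
      by_cases hc : c = '='
      · subst hc
        have hpre : List.isPrefixOf ['='] ('=' :: t) = true := by simp [List.isPrefixOf]
        simp only [hpre, if_pos, List.length_cons, List.drop_succ_cons, List.length_nil,
          List.drop_zero]
        rw [ih f _ (by simpa using hle)]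
        simp [pvRepl_cons]
      · have hpre : List.isPrefixOf ['='] (c :: t) = false := by
          simp [List.isPrefixOf]; exact fun h => absurd h.symm hc
        simp only [hpre]
        rw [if_neg (by simp)]
        rw [ih f _ (by simpa using hle)]
        simp [pvRepl_cons, hc]

theorem replace_spec (l : List Char) :
    PySem.Chars.replace l ['='] ['&', '='] = pvRepl l := by
  rw [PySem.Chars.replace]
  simp only [List.isEmpty_cons, Bool.false_eq_true, if_false]
  rw [replace_go_spec l l.length [] le_rfl]
  simp

theorem pvRepl_of_no_eq (u : List Char) (h : u.count '=' = 0) : pvRepl u = u := by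
  induction u with
  | nil => simp [pvRepl]
  | cons c t ih =>
    rw [List.count_cons] at h
    have hc : ¬ c = '=' := by intro hc; subst hc; simp at h
    rw [pvRepl_cons, if_neg (by simp [hc]), ih (by omega)]
    simp

theorem foldl_emit (l : List Char) : ∀ (n : Int) (acc : List Char),
    l.foldl (fun (st : Int × List Char) ch =>
      if ch == '=' then
        (st.1 + 1, st.2 ++ (if st.1 + 1 == 2 then ['='] else ['&', '=']))
      else (st.1, st.2 ++ [ch])) (n, acc)
    = (n + (l.count '=' : Int), acc ++ pvEmit n l) := by
  induction l with
  | nil => intro n acc; simp [pvEmit]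
  | cons c t ih =>
    intro n acc
    by_cases hc : c = '='
    · subst hc
      simp only [List.foldl_cons, if_pos (by rfl : ('=' == '=') = true)]
      rw [ih]
      rw [List.count_cons]
      simp [pvEmit]
      omega
    · simp only [List.foldl_cons, if_neg (by simp [hc] : ¬ ((c == '=') = true))]
      rw [ih, List.count_cons]
      simp [pvEmit, hc]

theorem pvEmit_of_ge_two (l : List Char) : ∀ (n : Int), 2 ≤ n → pvEmit n l = pvRepl l := by
  induction l with
  | nil => intro n _; simp [pvEmit, pvRepl]
  | cons c t ih =>
    intro n hn
    by_cases hc : c = '='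
    · subst hc
      rw [pvEmit, pvRepl_cons]
      rw [if_pos (by rfl), if_neg (by simp; omega), ih (n + 1) (by omega)]
      simp
    · rw [pvEmit, pvRepl_cons]
      simp [hc, ih n hn]

theorem pvEmit_append (a b : List Char) : ∀ (n : Int),
    pvEmit n (a ++ b) = pvEmit n a ++ pvEmit (n + a.count '=') b := by
  induction a with
  | nil => intro n; simp [pvEmit]
  | cons c t ih =>
    intro n
    by_cases hc : c = '='
    · subst hc
      simp only [List.cons_append, pvEmit, if_pos (by rfl : ('=' == '=') = true)]
      rw [ih, List.count_cons]
      simp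
      have harith : n + 1 + (t.count '=' : Int) = n + ((t.count '=' : Int) + 1) := by ring
      rw [harith]
    · simp only [List.cons_append, pvEmit, if_neg (by simp [hc] : ¬ ((c == '=') = true))]
      rw [ih, List.count_cons]
      simp [hc]

theorem pvEmit_of_no_eq (u : List Char) (n : Int) (h : u.count '=' = 0) : pvEmit n u = u := by
  induction u generalizing n with
  | nil => simp [pvEmit]
  | cons c t ih =>
    rw [List.count_cons] at h
    have hc : ¬ c = '=' := by intro hc; subst hc; simp at h
    rw [pvEmit, if_neg (by simp [hc]), ih n (by omega)]

theorem filter_enum_nil (u : List Char) (s : Int) (h : u.count '=' = 0) :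
    (PySem.List.enumerate u s).filter (fun p => p.2 == '=') = [] := by
  rw [List.filter_eq_nil_iff]
  intro p hp
  have h2 : p.2 ∈ u := by
    have hm := PySem.List.map_snd_enumerate u s
    rw [← hm]; exact List.mem_map_of_mem hp
  simp only [beq_iff_eq]
  intro heq
  rw [heq] at h2
  have := List.count_pos_iff.mpr h2
  omega

theorem split_one (l : List Char) (h : 1 ≤ l.count '=') :
    ∃ v w, l = v ++ '=' :: w ∧ v.count '=' = 0 := by
  induction l with
  | nil => simp at h
  | cons c t ih =>
    by_cases hc : c = '='
    · exact ⟨[], t, by simp [hc], by simp⟩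
    · rw [List.count_cons] at h
      simp only [beq_iff_eq, hc, if_false, add_zero] at h
      obtain ⟨v, w, hvw, hv⟩ := ih h
      exact ⟨c :: v, w, by simp [hvw], by simp [hv, hc]⟩

theorem split_two (l : List Char) (h : 2 ≤ l.count '=') :
    ∃ u v w, l = u ++ '=' :: (v ++ '=' :: w) ∧ u.count '=' = 0 ∧ v.count '=' = 0 := by
  obtain ⟨u, r, hur, hu⟩ := split_one l (by omega)
  have hr : 1 ≤ r.count '=' := by
    have h2 := h
    rw [hur, List.count_append, List.count_cons] at h2
    simp only [beq_self_eq_true, if_true, hu, zero_add] at h2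
    omega
  obtain ⟨v, w, hvw, hv⟩ := split_one r hr
  exact ⟨u, v, w, by rw [hur, hvw], hu, hv⟩

theorem pyGet?_one {α : Type} (a b : α) (r : List α) :
    PySem.List.pyGet? (a :: b :: r) 1 = some b := by
  simp [PySem.List.pyGet?, PySem.List.pyIdx?]

theorem emit_decomp (u v w : List Char) (hu : u.count '=' = 0) (hv : v.count '=' = 0) :
    pvEmit 0 (u ++ '=' :: (v ++ '=' :: w)) = u ++ '&' :: '=' :: (v ++ '=' :: pvRepl w) := by
  rw [pvEmit_append, pvEmit_of_no_eq u 0 hu, hu]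
  norm_num
  rw [pvEmit]
  norm_num
  rw [pvEmit_append, pvEmit_of_no_eq v _ hv, hv]
  norm_num
  rw [pvEmit]
  norm_num
  exact pvEmit_of_ge_two w 2 (by omega)

theorem repl_decomp (u v w : List Char) (hu : u.count '=' = 0) (hv : v.count '=' = 0) :
    pvRepl (u ++ '=' :: (v ++ '=' :: w)) = u ++ '&' :: '=' :: (v ++ '&' :: '=' :: pvRepl w) := by
  have h1 : u ++ '=' :: (v ++ '=' :: w) = u ++ (['='] ++ (v ++ (['='] ++ w))) := by simp
  rw [h1, pvRepl_append, pvRepl_append, pvRepl_append]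
  rw [pvRepl_of_no_eq u hu, pvRepl_of_no_eq v hv]
  simp [pvRepl]

theorem eqsigns_decomp (u v w : List Char) (hu : u.count '=' = 0) (hv : v.count '=' = 0) :
    ∃ rest, (PySem.List.enumerate (u ++ '=' :: (v ++ '=' :: w)) 0).foldl
        (fun acc p => if p.2 == '=' then acc ++ [p.1] else acc) []
      = ((u.length : Int) :: ((u.length + v.length + 1 : Nat) : Int) :: rest) := by
  rw [PySem.List.foldl_append_if]
  rw [PySem.List.enumerate_append, PySem.List.enumerate_cons,
    PySem.List.enumerate_append, PySem.List.enumerate_cons]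
  rw [List.filter_append, filter_enum_nil u 0 hu]
  rw [List.filter_cons_of_pos (by simp)]
  rw [List.filter_append, filter_enum_nil v _ hv]
  rw [List.filter_cons_of_pos (by simp)]
  refine ⟨(List.filter (fun p => p.2 == '=')
      (PySem.List.enumerate w ((0 : Int) + u.length + 1 + v.length + 1))).map Prod.fst, ?_⟩
  simp only [List.nil_append, List.map_cons]
  congr 2
  · omega
  · push_cast; ring

-- ===== VERDICT (by name: the statement is the Claim_ definition above) =====
theorem format_calc_lines_spec : Claim_equal_format_calc_lines := by
  intro s hdom hpre
  unfold Pre_format_calc_lines at hpre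
  unfold Spec_format_calc_lines
  obtain ⟨u, v, w, hl, hu, hv⟩ := split_two s.toList hpre
  obtain ⟨rest, hes⟩ := eqsigns_decomp u v w hu hv
  have hx2 : (PySem.Str.replace s "=" "&=").toList
      = u ++ '&' :: '=' :: (v ++ '&' :: '=' :: pvRepl w) := by
    rw [PySem.Str.toList_replace]
    rw [show ("=" : String).toList = ['='] from rfl,
      show ("&=" : String).toList = ['&', '='] from rfl]
    rw [replace_spec, hl, repl_decomp u v w hu hv]
  -- B side
  have hB : format_calc_lines_alt s
      = String.ofList ((u ++ '&' :: '=' :: (v ++ '=' :: pvRepl w)) ++ ['\n']) := by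
    unfold format_calc_lines_alt
    rw [hl, foldl_emit]
    rw [if_neg (by simp only []; rw [← hl]; omega)]
    rw [emit_decomp u v w hu hv]
    simp
  -- A side
  have hA : format_calc_lines s
      = String.ofList ((u ++ '&' :: '=' :: (v ++ '=' :: pvRepl w)) ++ ['\n']) := by
    unfold format_calc_lines
    rw [hl, hes]
    simp only [pyGet?_one, Option.elim_some]
    rw [PySem.Str.toList_slice, PySem.Str.toList_slice]
    rw [PySem.Chars.slice_eq_listSlice, PySem.Chars.slice_eq_listSlice]
    rw [PySem.List.slice_zero_start]
    rw [hx2]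
    have hi1 : ((u.length + v.length + 1 : Nat) : Int) + 1
        = ((u.length + v.length + 2 : Nat) : Int) := by push_cast; ring
    have hi2 : ((u.length + v.length + 1 : Nat) : Int) + 2
        = ((u.length + v.length + 3 : Nat) : Int) := by push_cast; ring
    rw [hi1, hi2]
    rw [PySem.List.slice_to _ (Int.natCast_nonneg _), PySem.List.slice_from _ (Int.natCast_nonneg _)]
    rw [Int.toNat_natCast, Int.toNat_natCast]
    have hg1 : u ++ '&' :: '=' :: (v ++ '&' :: '=' :: pvRepl w)
        = (u ++ '&' :: '=' :: v) ++ ('&' :: '=' :: pvRepl w) := by simp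
    have hg2 : u ++ '&' :: '=' :: (v ++ '&' :: '=' :: pvRepl w)
        = ((u ++ '&' :: '=' :: v) ++ ['&']) ++ ('=' :: pvRepl w) := by simp
    rw [show List.take (u.length + v.length + 2) (u ++ '&' :: '=' :: (v ++ '&' :: '=' :: pvRepl w))
        = u ++ '&' :: '=' :: v by rw [hg1]; exact List.take_left' (by simp; omega)]
    rw [show List.drop (u.length + v.length + 3) (u ++ '&' :: '=' :: (v ++ '&' :: '=' :: pvRepl w))
        = '=' :: pvRepl w by rw [hg2]; exact List.drop_left' (by simp; omega)]
    congr 1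
    simp
  rw [hA, hB]
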